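-- pv_equiv track=rewrite | github.com/ccam80/zotero-chunk-mcp | tests/llm_structure/parse_markdown.py | _split_pipe_cells
-- ===== SOURCE A (Python) =====
-- def _split_pipe_cells(line: str) -> list[str]:
--     """Split a pipe-delimited line into cells, respecting escaped pipes.
--
--     Handles \\| (escaped pipe) by temporarily replacing it, splitting on |,
--     then restoring the escaped pipe in cell values.
--     """
--     placeholder = "\x00PIPE\x00"
--     work = line.replace("\\|", placeholder)
--
--     work = work.strip()
--     if work.startswith("|"):
--         work = work[1:]
--     if work.endswith("|"):
--         work = work[:-1]
--
--     cells = work.split("|")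
--     return [cell.replace(placeholder, "|").strip() for cell in cells]
-- ===== SOURCE B (Python) =====
-- def _split_pipe_cells(line: str) -> list[str]:
--     """Split a pipe-delimited line into cells, respecting escaped pipes.
--
--     Single left-to-right scan with a cell buffer instead of the
--     placeholder replace/strip/split/restore pipeline.
--     """
--     s = line.strip()
--     i = 0
--     if s.startswith("|"):
--         i = 1
--     n = len(s)
--     cells = []
--     buf = []
--     ended_with_sep = False
--     while i < n:
--         c = s[i]
--         if c == "\\" and i + 1 < n and s[i + 1] == "|":
--             buf.append("|")
--             i += 2
--             ended_with_sep = False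
--         elif c == "|":
--             cells.append("".join(buf))
--             buf = []
--             i += 1
--             ended_with_sep = True
--         else:
--             buf.append(c)
--             i += 1
--             ended_with_sep = False
--     if not ended_with_sep:
--         cells.append("".join(buf))
--     return [cell.strip() for cell in cells]
-- ===== Notes on version B (the rewrite author's own statement) =====
-- stated objective: alternative
-- what changed: Replaced the placeholder-substitution pipeline (replace '\|' with a sentinel, strip, trim one pipe each end, split on '|', restore and strip each cell) by a single left-to-right character scan that keeps a current-cell buffer and handles escaped pipes in place.
import Mathlib
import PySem

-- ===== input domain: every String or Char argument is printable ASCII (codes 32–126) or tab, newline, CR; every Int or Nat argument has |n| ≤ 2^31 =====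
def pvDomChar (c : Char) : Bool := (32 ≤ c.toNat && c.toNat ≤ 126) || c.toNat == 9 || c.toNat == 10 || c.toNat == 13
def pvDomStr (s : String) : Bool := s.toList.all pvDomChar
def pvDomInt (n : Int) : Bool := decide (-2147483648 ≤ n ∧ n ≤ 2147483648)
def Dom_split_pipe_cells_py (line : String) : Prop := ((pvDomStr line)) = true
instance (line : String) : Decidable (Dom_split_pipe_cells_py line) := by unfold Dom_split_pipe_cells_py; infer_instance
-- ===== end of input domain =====

-- B replaces A's placeholder-substitution pipeline (replace/strip/trim/split/restore)
-- by a single left-to-right scan with a current-cell buffer; return values proved equal on Dom.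

-- ===== PORT A =====
def split_pipe_cells_py (line : String) : List String :=
  let placeholder : String := "\x00PIPE\x00"
  let work0 := PySem.Str.replace line "\\|" placeholder
  let work1 := PySem.Str.strip work0
  let work2 := if PySem.Str.startswith work1 "|" then PySem.Str.slice work1 (some 1) none else work1
  let work3 := if PySem.Str.endswith work2 "|" then PySem.Str.slice work2 none (some (-1)) else work2
  -- work3.split("|"): separator "|" is nonempty, so this is the some-branch of PySem.Str.split?
  let cells := (PySem.Chars.splitOn work3.toList ['|']).map String.ofList
  cells.map (fun cell => PySem.Str.strip (PySem.Str.replace cell placeholder "|"))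

-- ===== PORT B =====
-- the while loop of Source B: remaining chars, current-cell buffer, cells so far, ended_with_sep flag
def bGo : List Char → List Char → List String → Bool → List String
  | [], buf, cells, flag => if flag then cells else cells ++ [String.ofList buf]
  | '\\' :: '|' :: rest, buf, cells, _ => bGo rest (buf ++ ['|']) cells false
  | '|' :: rest, buf, cells, _ => bGo rest [] (cells ++ [String.ofList buf]) true
  | c :: rest, buf, cells, _ => bGo rest (buf ++ [c]) cells false

def split_pipe_cells_py_alt (line : String) : List String :=
  let s := PySem.Str.strip line
  let s := if PySem.Str.startswith s "|" then PySem.Str.slice s (some 1) none else s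
  (bGo s.toList [] [] false).map (fun cell => PySem.Str.strip cell)

-- ===== PRECONDITION & SPEC =====
def Spec_split_pipe_cells_py (line : String) (out : List String) : Prop := out = split_pipe_cells_py_alt line
instance (line : String) (out : List String) : Decidable (Spec_split_pipe_cells_py line out) := by unfold Spec_split_pipe_cells_py; infer_instance

-- ===== CLAIM (what is proved, stated in full; the proofs are below) =====
def Claim_equal_split_pipe_cells_py : Prop := ∀ (line : String), Dom_split_pipe_cells_py line → Spec_split_pipe_cells_py line (split_pipe_cells_py line)

-- ===== LEMMAS AND PROOFS =====

def PHl : List Char := ['\x00', 'P', 'I', 'P', 'E', '\x00']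
def escA : List Char → List Char
  | [] => []
  | '\\' :: '|' :: t => PHl ++ escA t
  | c :: t => c :: escA t

lemma prefix_false {c : Char} {t : List Char}
    (h : ∀ (t₁ : List Char), c = '\\' → t = '|' :: t₁ → False) :
    List.isPrefixOf ['\\','|'] (c :: t) = false := by
  by_cases hc : c = '\\'
  · subst hc
    match t with
    | [] => simp [List.isPrefixOf]
    | x :: t' =>
      by_cases hx : x = '|'
      · exact (h t' rfl (by rw [hx])).elim
      · simp [List.isPrefixOf]; intro h'; exact (hx h'.symm).elim
  · simp [List.isPrefixOf]; intro h'; exact (hc h'.symm).elim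

lemma escA_cons {c : Char} {t : List Char}
    (h : ∀ (t₁ : List Char), c = '\\' → t = '|' :: t₁ → False) :
    escA (c :: t) = c :: escA t := by
  rw [escA.eq_def]
  split
  · rename_i heq; exact absurd heq (by simp)
  · rename_i t₁ heq; injection heq with h1 h2; exact (h t₁ h1 h2).elim
  · rename_i heq2 heq; injection heq with h1 h2; rw [h1, h2]

lemma replace_go_esc : ∀ l fuel acc, l.length ≤ fuel →
    PySem.Chars.replace.go ['\\','|'] PHl fuel l acc = acc.reverse ++ escA l := by
  intro l
  induction l using escA.induct with
  | case1 => intro fuel acc h; cases fuel <;> simp [PySem.Chars.replace.go, escA]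
  | case2 t ih =>
    intro fuel acc h
    match fuel with
    | n + 1 =>
      rw [PySem.Chars.replace.go]
      have hp : List.isPrefixOf ['\\','|'] ('\\' :: '|' :: t) = true := by
        simp [List.isPrefixOf]
      simp only [hp, if_pos, List.length_cons, List.drop_succ_cons, List.drop_zero,
        List.length_nil]
      rw [ih]
      · simp [escA]
      · simp at h ⊢; omega
  | case3 c t h ih =>
    intro fuel acc hf
    match fuel with
    | n + 1 =>
      rw [PySem.Chars.replace.go]
      simp only [prefix_false h, Bool.false_eq_true, if_false]
      rw [ih]
      · rw [escA_cons h]; simp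
      · simp at hf ⊢; omega

def unescA : List Char → List Char
  | '\x00' :: 'P' :: 'I' :: 'P' :: 'E' :: '\x00' :: t => '|' :: unescA t
  | c :: t => c :: unescA t
  | [] => []

def mapHd (f : List Char → List Char) : List (List Char) → List (List Char)
  | [] => []
  | h :: r => f h :: r

def psplit : List Char → List (List Char)
  | [] => [[]]
  | '|' :: t => [] :: psplit t
  | c :: t => mapHd (fun x => c :: x) (psplit t)


lemma prefixPH_false {c : Char} {t : List Char}
    (h : ∀ (t₁ : List Char), c = '\x00' → t = 'P' :: 'I' :: 'P' :: 'E' :: '\x00' :: t₁ → False) :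
    List.isPrefixOf PHl (c :: t) = false := by
  cases hp : List.isPrefixOf PHl (c :: t)
  · rfl
  · exfalso
    obtain ⟨u, hu⟩ := List.isPrefixOf_iff_prefix.mp hp
    simp only [PHl, List.cons_append] at hu
    injection hu with h1 h2
    exact h u h1.symm h2.symm

lemma unescA_cons {c : Char} {t : List Char}
    (h : ∀ (t₁ : List Char), c = '\x00' → t = 'P' :: 'I' :: 'P' :: 'E' :: '\x00' :: t₁ → False) :
    unescA (c :: t) = c :: unescA t := by
  rw [unescA.eq_def]
  split
  · rename_i t₁ heq
    injection heq with h1 h2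
    exact (h _ h1 (by rw [h2])).elim
  · rename_i heq2 heq; injection heq with h1 h2; rw [h1, h2]
  · rename_i heq; exact absurd heq (by simp)

lemma replace_go_unesc : ∀ l fuel acc, l.length ≤ fuel →
    PySem.Chars.replace.go PHl ['|'] fuel l acc = acc.reverse ++ unescA l := by
  intro l
  induction l using unescA.induct with
  | case3 => intro fuel acc h; cases fuel <;> simp [PySem.Chars.replace.go, unescA]
  | case1 t ih =>
    intro fuel acc h
    match fuel with
    | n + 1 =>
      rw [PySem.Chars.replace.go]
      have hp : List.isPrefixOf PHl ('\x00' :: 'P' :: 'I' :: 'P' :: 'E' :: '\x00' :: t) = true := by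
        simp [PHl, List.isPrefixOf]
      simp only [hp, if_pos]
      have hd : List.drop PHl.length ('\x00' :: 'P' :: 'I' :: 'P' :: 'E' :: '\x00' :: t) = t := by
        simp [PHl]
      rw [show PHl.length = 6 from rfl] at *
      simp only [List.drop_succ_cons, List.drop_zero]
      rw [ih]
      · simp [unescA]
      · simp at h ⊢; omega
  | case2 c t h ih =>
    intro fuel acc hf
    match fuel with
    | n + 1 =>
      rw [PySem.Chars.replace.go]
      simp only [prefixPH_false h, Bool.false_eq_true, if_false]
      rw [ih]
      · rw [unescA_cons h]; simp
      · simp at hf ⊢; omega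

lemma psplit_ne_nil (l : List Char) : psplit l ≠ [] := by
  induction l using psplit.induct with
  | case1 => simp [psplit]
  | case2 t ih => simp [psplit]
  | case3 c t h ih =>
    rw [psplit.eq_def]
    split
    · simp
    · simp
    · rename_i heq2 heq; cases hp : psplit t with
      | nil => exact (ih hp).elim
      | cons a r => injection heq with h1 h2; rw [← h2, hp]; simp [mapHd]

lemma psplit_cons {c : Char} {t : List Char} (h : c ≠ '|') :
    psplit (c :: t) = mapHd (fun x => c :: x) (psplit t) := by
  rw [psplit.eq_def]
  split
  · rename_i heq; exact absurd heq (by simp)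
  · rename_i heq; injection heq with h1 h2; exact (h h1).elim
  · rename_i heq2 heq; injection heq with h1 h2; rw [h1, h2]

lemma splitOn_go_psplit : ∀ l fuel cur acc, l.length ≤ fuel →
    PySem.Chars.splitOn.go ['|'] fuel l cur acc
      = acc.reverse ++ mapHd (fun x => cur.reverse ++ x) (psplit l) := by
  intro l
  induction l using psplit.induct with
  | case1 =>
    intro fuel cur acc h
    cases fuel <;> simp [PySem.Chars.splitOn.go, psplit, mapHd]
  | case2 t ih =>
    intro fuel cur acc h
    match fuel with
    | n + 1 =>
      rw [PySem.Chars.splitOn.go]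
      have hp : List.isPrefixOf ['|'] ('|' :: t) = true := by simp [List.isPrefixOf]
      simp only [hp, if_pos, List.length_cons, List.length_nil, List.drop_succ_cons,
        List.drop_zero]
      rw [ih]
      · cases hq : psplit t with
        | nil => exact (psplit_ne_nil t hq).elim
        | cons a r => simp [psplit, hq, mapHd]
      · simp at h ⊢; omega
  | case3 c t h ih =>
    intro fuel cur acc hf
    match fuel with
    | n + 1 =>
      rw [PySem.Chars.splitOn.go]
      have hp : List.isPrefixOf ['|'] (c :: t) = false := by
        cases hb : List.isPrefixOf ['|'] (c :: t)
        · rfl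
        · obtain ⟨u, hu⟩ := List.isPrefixOf_iff_prefix.mp hb
          injection hu with h1 h2
          exact (h h1.symm).elim
      simp only [hp, Bool.false_eq_true, if_false]
      rw [ih]
      · rw [psplit_cons h]
        cases hq : psplit t with
        | nil => exact (psplit_ne_nil t hq).elim
        | cons a r => simp [mapHd]
      · simp at hf ⊢; omega

lemma chars_replace_esc (s : List Char) :
    PySem.Chars.replace s ['\\','|'] PHl = escA s := by
  rw [PySem.Chars.replace]
  simp only [List.isEmpty_cons, Bool.false_eq_true, if_false]
  rw [replace_go_esc s s.length [] le_rfl]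
  simp

lemma chars_replace_unesc (s : List Char) :
    PySem.Chars.replace s PHl ['|'] = unescA s := by
  rw [PySem.Chars.replace]
  simp only [PHl, List.isEmpty_cons, Bool.false_eq_true, if_false]
  rw [show ('\x00' :: ['P', 'I', 'P', 'E', '\x00']) = PHl from rfl,
    replace_go_unesc s s.length [] le_rfl]
  simp

lemma chars_splitOn_psplit (s : List Char) :
    PySem.Chars.splitOn s ['|'] = psplit s := by
  rw [PySem.Chars.splitOn]
  rw [splitOn_go_psplit s (s.length + 1) [] [] (by omega)]
  cases hq : psplit s with
  | nil => exact (psplit_ne_nil s hq).elim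
  | cons a r => simp [mapHd]

def scan : List Char → List (List Char)
  | [] => [[]]
  | '\\' :: '|' :: t => mapHd (fun x => '|' :: x) (scan t)
  | '|' :: t => [] :: scan t
  | c :: t => mapHd (fun x => c :: x) (scan t)

def noNul (l : List Char) : Prop := ∀ c ∈ l, c ≠ '\x00'

lemma mapHd_mapHd (f g : List Char → List Char) (l : List (List Char)) :
    mapHd f (mapHd g l) = mapHd (fun x => f (g x)) l := by
  cases l <;> simp [mapHd]

lemma scan_cons {c : Char} {t : List Char}
    (h1 : ∀ (t₁ : List Char), c = '\\' → t = '|' :: t₁ → False) (h2 : c = '|' → False) :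
    scan (c :: t) = mapHd (fun x => c :: x) (scan t) := by
  rw [scan.eq_def]
  split
  · rename_i heq; exact absurd heq (by simp)
  · rename_i t₁ heq; injection heq with ha hb
    exact (h1 t₁ ha hb).elim
  · rename_i heq; injection heq with ha hb; exact (h2 ha).elim
  · rename_i hx hy heq; injection heq with ha hb; rw [ha, hb]

lemma scan_ne_nil (l : List Char) : scan l ≠ [] := by
  induction l using scan.induct with
  | case1 => simp [scan]
  | case2 t ih =>
    rw [show scan ('\\' :: '|' :: t) = mapHd (fun x => '|' :: x) (scan t) from by rw [scan]]
    cases hp : scan t with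
    | nil => exact (ih hp).elim
    | cons a r => simp [mapHd]
  | case3 t ih =>
    rw [show scan ('|' :: t) = [] :: scan t from by rw [scan]]
    simp
  | case4 c t h1 h2 ih =>
    rw [scan_cons h1 h2]
    cases hp : scan t with
    | nil => exact (ih hp).elim
    | cons a r => simp [mapHd]

lemma escA_cons' {c : Char} {t : List Char} (h1 : ¬ (c = '\\' ∧ ∃ t₁, t = '|' :: t₁)) :
    escA (c :: t) = c :: escA t :=
  escA_cons (fun t₁ ha hb => h1 ⟨ha, t₁, hb⟩)

lemma unescA_cons' {c : Char} (z : List Char) (h : c ≠ '\x00') :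
    unescA (c :: z) = c :: unescA z :=
  unescA_cons (fun _ ha _ => h ha)

lemma unescA_PH (z : List Char) : unescA (PHl ++ z) = '|' :: unescA z := rfl

lemma psplit_PH (z : List Char) :
    psplit (PHl ++ z) = mapHd (fun x => PHl ++ x) (psplit z) := by
  show psplit ('\x00' :: 'P' :: 'I' :: 'P' :: 'E' :: '\x00' :: z) = _
  rw [psplit_cons (by decide), psplit_cons (by decide), psplit_cons (by decide),
    psplit_cons (by decide), psplit_cons (by decide), psplit_cons (by decide)]
  simp [mapHd_mapHd, PHl]

lemma M : ∀ v : List Char, noNul v →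
    (psplit (escA v)).map unescA = scan v := by
  intro v
  induction v using scan.induct with
  | case1 => intro _; simp [escA, psplit, scan, unescA]
  | case2 t ih =>
    intro hn
    have hnt : noNul t := fun c hc => hn c (by simp [hc])
    rw [show escA ('\\' :: '|' :: t) = PHl ++ escA t from by rw [escA]]
    rw [psplit_PH]
    cases hp : psplit (escA t) with
    | nil => exact (psplit_ne_nil _ hp).elim
    | cons a r =>
      rw [show scan ('\\' :: '|' :: t) = mapHd (fun x => '|' :: x) (scan t) from by rw [scan]]
      rw [← ih hnt, hp]
      simp [mapHd, unescA_PH]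
  | case3 t ih =>
    intro hn
    have hnt : noNul t := fun c hc => hn c (by simp [hc])
    rw [escA_cons' (by simp)]
    rw [show psplit ('|' :: escA t) = [] :: psplit (escA t) from by rw [psplit]]
    simp only [List.map_cons]
    rw [ih hnt]
    rw [show scan ('|' :: t) = [] :: scan t from by rw [scan]]
    simp [unescA]
  | case4 c t h1 h2 ih =>
    intro hn
    have hnt : noNul t := fun x hx => hn x (by simp [hx])
    have hc : c ≠ '\x00' := hn c (by simp)
    have hcp : c ≠ '|' := fun hq => h2 hq
    rw [escA_cons (fun t₁ ha hb => h1 t₁ ha hb), psplit_cons hcp, scan_cons h1 h2]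
    rw [← ih hnt]
    cases hp : psplit (escA t) with
    | nil => exact (psplit_ne_nil _ hp).elim
    | cons a r => simp [mapHd, unescA_cons' _ hc]


def endsP : List Char → Bool
  | [] => false
  | '\\' :: '|' :: t => endsP t
  | ['|'] => true
  | _ :: t => endsP t

def T : List Char → List (List Char)
  | [] => [[]]
  | '\\' :: '|' :: t => mapHd (fun x => '|' :: x) (T t)
  | ['|'] => [[]]
  | '|' :: t => [] :: T t
  | c :: t => mapHd (fun x => c :: x) (T t)

lemma endsP_cons {c : Char} {t : List Char}
    (h1 : ∀ (t₁ : List Char), c = '\\' → t = '|' :: t₁ → False)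
    (h2 : c = '|' → t = [] → False) :
    endsP (c :: t) = endsP t := by
  rw [endsP.eq_def]
  split
  · rename_i heq; exact absurd heq (by simp)
  · rename_i t₁ heq; injection heq with ha hb; exact (h1 t₁ ha hb).elim
  · rename_i heq; injection heq with ha hb; exact (h2 ha hb).elim
  · rename_i hx hy heq; injection heq with ha hb; rw [hb]

lemma T_pair (t : List Char) : T ('\\' :: '|' :: t) = mapHd (fun x => '|' :: x) (T t) := by
  rw [T]

lemma T_pipe_cons {t : List Char} (h : t ≠ []) : T ('|' :: t) = [] :: T t := by
  rw [T.eq_def]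
  split
  · rename_i heq; exact absurd heq (by simp)
  · rename_i heq; injection heq with ha hb; exact absurd ha (by decide)
  · rename_i heq; injection heq with ha hb; exact (h hb).elim
  · rename_i hx heq; injection heq with ha hb; rw [hb]
  · rename_i hx hy hz heq; injection heq with ha hb; exact (hz ha.symm).elim

lemma T_cons {c : Char} {t : List Char}
    (h1 : ∀ (t₁ : List Char), c = '\\' → t = '|' :: t₁ → False)
    (h2 : c = '|' → False) :
    T (c :: t) = mapHd (fun x => c :: x) (T t) := by
  rw [T.eq_def]
  split
  · rename_i heq; exact absurd heq (by simp)
  · rename_i t₁ heq; injection heq with ha hb; exact (h1 t₁ ha hb).elim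
  · rename_i heq; injection heq with ha hb; exact (h2 ha).elim
  · rename_i hx heq; injection heq with ha hb; exact (h2 ha).elim
  · rename_i hx hy hz heq; injection heq with ha hb; rw [ha, hb]

lemma T_ne_nil (l : List Char) : T l ≠ [] := by
  induction l using T.induct with
  | case1 => simp [T]
  | case2 t ih =>
    rw [T_pair]
    cases hp : T t with
    | nil => exact (ih hp).elim
    | cons a r => simp [mapHd]
  | case3 => rw [show T ['|'] = [[]] from by rw [T]]; simp
  | case4 t h ih => rw [T_pipe_cons (fun hq => h hq)]; simp
  | case5 c t h1 h2 h3 ih =>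
    rw [T_cons h1 h3]
    cases hp : T t with
    | nil => exact (ih hp).elim
    | cons a r => simp [mapHd]

lemma mapHd_dropLast (f : List Char → List Char) (l : List (List Char)) :
    mapHd f l.dropLast = (mapHd f l).dropLast := by
  match l with
  | [] => simp [mapHd]
  | [a] => simp [mapHd]
  | a :: b :: r => simp [mapHd, List.dropLast_cons₂]

lemma T_eq (v : List Char) :
    T v = if endsP v then (scan v).dropLast else scan v := by
  induction v using T.induct with
  | case1 => simp [T, endsP, scan]
  | case2 t ih =>
    rw [T_pair, show scan ('\\' :: '|' :: t) = mapHd (fun x => '|' :: x) (scan t) from by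
      rw [scan], show endsP ('\\' :: '|' :: t) = endsP t from by rw [endsP], ih]
    by_cases h : endsP t = true
    · simp only [h, if_true, mapHd_dropLast]
    · simp only [if_neg h]
  | case3 =>
    rw [show T ['|'] = [[]] from by rw [T], show endsP ['|'] = true from by rw [endsP],
      show scan ['|'] = [[], []] from by decide]
    simp
  | case4 t h ih =>
    rw [T_pipe_cons (fun hq => h hq), ih]
    rw [show scan ('|' :: t) = [] :: scan t from by rw [scan]]
    rw [endsP_cons (by intro t₁ ha hb; exact absurd ha (by decide)) (fun _ hb => h hb)]
    by_cases hb : endsP t = true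
    · simp only [hb, if_true]
      rw [List.dropLast_cons_of_ne_nil (scan_ne_nil t)]
    · simp only [if_neg hb]
  | case5 c t h1 h2 h3 ih =>
    rw [T_cons h1 h3, scan_cons h1 h3, ih, endsP_cons h1 (fun ha _ => h3 ha)]
    by_cases hb : endsP t = true
    · simp only [hb, if_true, mapHd_dropLast]
    · simp only [if_neg hb]

lemma escA_eq_nil_iff (l : List Char) : escA l = [] ↔ l = [] := by
  induction l using escA.induct with
  | case1 => simp [escA]
  | case2 t ih => rw [show escA ('\\' :: '|' :: t) = PHl ++ escA t from by rw [escA]]; simp [PHl]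
  | case3 c t h ih => rw [escA_cons h]; simp

lemma escA_last (v : List Char) : (escA v).getLast? = some '|' ↔ endsP v = true := by
  induction v using endsP.induct with
  | case1 => simp [escA, endsP]
  | case2 t ih =>
    rw [show escA ('\\' :: '|' :: t) = PHl ++ escA t from by rw [escA],
      show endsP ('\\' :: '|' :: t) = endsP t from by rw [endsP]]
    by_cases ht : t = []
    · subst ht; simp [escA, endsP, PHl]
    · rw [List.getLast?_append_of_ne_nil _ ((not_iff_not.mpr (escA_eq_nil_iff t)).mpr ht)]
      exact ih
  | case3 =>
    rw [escA_cons (by intro t₁ ha _; exact absurd ha (by decide))]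
    simp [escA, endsP]
  | case4 c t h1 h2 ih =>
    rw [escA_cons h1, endsP_cons h1 h2]
    by_cases ht : t = []
    · subst ht
      have hc : c ≠ '|' := fun hq => h2 hq rfl
      simp [escA, endsP, hc]
    · rw [show c :: escA t = [c] ++ escA t from rfl,
        List.getLast?_append_of_ne_nil _ ((not_iff_not.mpr (escA_eq_nil_iff t)).mpr ht)]
      exact ih

lemma mapHd_append (f : List Char → List Char) {l : List (List Char)} (h : l ≠ [])
    (m : List (List Char)) : mapHd f (l ++ m) = mapHd f l ++ m := by
  cases l with
  | nil => exact (h rfl).elim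
  | cons a r => simp [mapHd]

lemma psplit_append_pipe (xs : List Char) : psplit (xs ++ ['|']) = psplit xs ++ [[]] := by
  induction xs using psplit.induct with
  | case1 => decide
  | case2 t ih =>
    rw [List.cons_append, show psplit ('|' :: (t ++ ['|'])) = [] :: psplit (t ++ ['|']) from by rw [psplit]]
    rw [ih, show psplit ('|' :: t) = [] :: psplit t from by rw [psplit]]
    simp
  | case3 c t h ih =>
    have hc : c ≠ '|' := fun hq => h hq
    rw [List.cons_append, psplit_cons hc, ih, psplit_cons hc,
      mapHd_append _ (psplit_ne_nil t)]

lemma main_trail (v : List Char) (hn : noNul v) :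
    (psplit (if endsP v = true then (escA v).dropLast else escA v)).map unescA = T v := by
  rw [T_eq]
  by_cases hb : endsP v = true
  · simp only [hb, if_true]
    have hlast : (escA v).getLast? = some '|' := (escA_last v).mpr hb
    have hsplit : escA v = (escA v).dropLast ++ ['|'] := by
      conv_lhs => rw [← List.dropLast_append_getLast? '|' hlast]
      
    have : psplit (escA v) = psplit ((escA v).dropLast) ++ [[]] := by
      conv_lhs => rw [hsplit]
      exact psplit_append_pipe _
    have h2 : psplit ((escA v).dropLast) = (psplit (escA v)).dropLast := by
      rw [this]; simp
    rw [h2, ← M v hn, List.map_dropLast]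
  · simp only [if_neg hb]
    exact M v hn


-- ---- strip commutes with escA ----

lemma lstrip_escA (s : List Char) :
    List.dropWhile PySem.Chars.isspace (escA s)
      = escA (List.dropWhile PySem.Chars.isspace s) := by
  induction s using escA.induct with
  | case1 => simp [escA]
  | case2 t ih =>
    rw [show escA ('\\' :: '|' :: t) = PHl ++ escA t from by rw [escA]]
    rw [show PHl ++ escA t = '\x00' :: (['P','I','P','E','\x00'] ++ escA t) from rfl]
    rw [List.dropWhile_cons, List.dropWhile_cons]
    simp only [show PySem.Chars.isspace '\x00' = false from by decide,
      show PySem.Chars.isspace '\\' = false from by decide, Bool.false_eq_true, if_false]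
    rw [show escA ('\\' :: '|' :: t) = PHl ++ escA t from by rw [escA]]
    rfl
  | case3 c t h ih =>
    rw [escA_cons h, List.dropWhile_cons, List.dropWhile_cons]
    by_cases hs : PySem.Chars.isspace c = true
    · simp only [hs, if_true]
      exact ih
    · simp only [hs, Bool.false_eq_true, if_false, escA_cons h]

lemma escA_append_ws (s : List Char) {w : Char} (hw : PySem.Chars.isspace w = true) :
    escA (s ++ [w]) = escA s ++ [w] := by
  have hwp : w ≠ '|' := by intro hq; rw [hq] at hw; exact absurd hw (by decide)
  have hwb : w ≠ '\\' := by intro hq; rw [hq] at hw; exact absurd hw (by decide)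
  induction s using escA.induct with
  | case1 => simp [escA, escA_cons (fun t₁ ha hb => hwb ha)]
  | case2 t ih =>
    rw [List.cons_append, List.cons_append,
      show escA ('\\' :: '|' :: (t ++ [w])) = PHl ++ escA (t ++ [w]) from by rw [escA],
      show escA ('\\' :: '|' :: t) = PHl ++ escA t from by rw [escA], ih]
    simp
  | case3 c t h ih =>
    rw [List.cons_append, escA_cons h]
    have h' : ∀ (t₁ : List Char), c = '\\' → t ++ [w] = '|' :: t₁ → False := by
      intro t₁ ha hb
      match t, hb with
      | [], hb => injection hb with h1 _; exact hwp h1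
      | x :: t', hb => injection hb with h1 h2; exact h t' ha (by rw [h1])
    rw [escA_cons h', ih]
    simp

lemma escA_getLast_nonspace (s : List Char)
    (h : ∀ d, s.getLast? = some d → PySem.Chars.isspace d = false) :
    ∀ c, (escA s).getLast? = some c → PySem.Chars.isspace c = false := by
  induction s using escA.induct with
  | case1 => intro c hc; simp [escA] at hc
  | case2 t ih =>
    intro c hc
    rw [show escA ('\\' :: '|' :: t) = PHl ++ escA t from by rw [escA]] at hc
    by_cases ht : t = []
    · subst ht
      rw [show escA [] = [] from by rw [escA], List.append_nil] at hc
      rw [show PHl.getLast? = some '\x00' from by decide] at hc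
      injection hc with hc'; rw [← hc']; decide
    · rw [List.getLast?_append_of_ne_nil _ ((not_iff_not.mpr (escA_eq_nil_iff t)).mpr ht)] at hc
      refine ih ?_ c hc
      intro d hd
      refine h d ?_
      rw [show ('\\' :: '|' :: t) = ['\\', '|'] ++ t from rfl,
        List.getLast?_append_of_ne_nil _ ht]
      exact hd
  | case3 c t hne ih =>
    intro x hx
    rw [escA_cons hne] at hx
    by_cases ht : t = []
    · subst ht
      rw [show escA [] = [] from by rw [escA]] at hx
      simp at hx
      exact hx ▸ h c (by simp)
    · rw [show c :: escA t = [c] ++ escA t from rfl,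
        List.getLast?_append_of_ne_nil _ ((not_iff_not.mpr (escA_eq_nil_iff t)).mpr ht)] at hx
      refine ih ?_ x hx
      intro d hd
      refine h d ?_
      rw [show (c :: t) = [c] ++ t from rfl, List.getLast?_append_of_ne_nil _ ht]
      exact hd

lemma rstrip_escA (s : List Char) :
    PySem.Chars.rstrip (escA s) = escA (PySem.Chars.rstrip s) := by
  induction s using List.reverseRecOn with
  | nil => simp [PySem.Chars.rstrip, escA]
  | append_singleton xs a ih =>
    by_cases ha : PySem.Chars.isspace a = true
    · have h1 : PySem.Chars.rstrip (xs ++ [a]) = PySem.Chars.rstrip xs := by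
        simp [PySem.Chars.rstrip, ha]
      rw [escA_append_ws xs ha, h1, ← ih]
      simp [PySem.Chars.rstrip, ha]
    · have h1 : PySem.Chars.rstrip (xs ++ [a]) = xs ++ [a] := by
        simp [PySem.Chars.rstrip, ha]
      rw [h1]
      -- escA (xs ++ [a]) ends in a non-space char, so rstrip leaves it unchanged
      have hne : escA (xs ++ [a]) ≠ [] := by
        rw [ne_eq, escA_eq_nil_iff]; simp
      have hlast : ∀ c, (escA (xs ++ [a])).getLast? = some c →
          PySem.Chars.isspace c = false := by
        refine escA_getLast_nonspace _ ?_
        intro d hd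
        rw [List.getLast?_append_of_ne_nil _ (by simp : ([a] : List Char) ≠ [])] at hd
        simp at hd
        rw [← hd]
        simpa using ha
      obtain ⟨c, hc⟩ := List.getLast?_isSome.mpr hne |> Option.isSome_iff_exists.mp
      have hrev : (escA (xs ++ [a])).reverse = c :: (escA (xs ++ [a])).dropLast.reverse := by
        conv_lhs => rw [← List.dropLast_append_getLast? c hc]
        simp
      rw [PySem.Chars.rstrip, hrev, List.dropWhile_cons]
      simp only [hlast c hc, Bool.false_eq_true, if_false]
      rw [← hrev, List.reverse_reverse]

lemma strip_escA (s : List Char) :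
    PySem.Chars.strip (escA s) = escA (PySem.Chars.strip s) := by
  rw [PySem.Chars.strip, PySem.Chars.strip, PySem.Chars.lstrip, PySem.Chars.lstrip,
    lstrip_escA, rstrip_escA]

-- ---- leading pipe ----

lemma startswith_escA (u : List Char) :
    List.isPrefixOf ['|'] (escA u) = List.isPrefixOf ['|'] u := by
  induction u using escA.induct with
  | case1 => simp [escA]
  | case2 t ih =>
    rw [show escA ('\\' :: '|' :: t) = PHl ++ escA t from by rw [escA]]
    rw [show PHl ++ escA t = '\x00' :: (['P','I','P','E','\x00'] ++ escA t) from rfl]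
    simp [List.isPrefixOf]
  | case3 c t h ih =>
    rw [escA_cons h]
    simp [List.isPrefixOf]

-- ---- noNul ----

lemma noNul_of_dom {line : String} (h : pvDomStr line = true) : noNul line.toList := by
  intro c hc hq
  have := (List.all_eq_true.mp h) c hc
  rw [hq] at this
  exact absurd this (by decide)

lemma noNul_strip {l : List Char} (h : noNul l) : noNul (PySem.Chars.strip l) := by
  intro c hc
  apply h
  rw [PySem.Chars.strip, PySem.Chars.rstrip, PySem.Chars.lstrip] at hc
  rw [List.mem_reverse] at hc
  have h1 := (List.dropWhile_sublist (p := PySem.Chars.isspace)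
    (l := (List.dropWhile PySem.Chars.isspace l).reverse)).mem hc
  rw [List.mem_reverse] at h1
  exact (List.dropWhile_sublist _).mem h1

-- ---- the B loop ----

lemma bGo_pair (rest buf : List Char) (cells : List String) (flag : Bool) :
    bGo ('\\' :: '|' :: rest) buf cells flag = bGo rest (buf ++ ['|']) cells false := by
  rw [bGo]

lemma bGo_pipe (rest buf : List Char) (cells : List String) (flag : Bool) :
    bGo ('|' :: rest) buf cells flag
      = bGo rest [] (cells ++ [String.ofList buf]) true := by
  rw [bGo.eq_def]
  split
  · rename_i heq; exact absurd heq (by simp)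
  · rename_i t₁ heq; injection heq with h1 h2; exact absurd h1 (by decide)
  · rename_i t₁ heq; injection heq with h1 h2; rw [h2]
  · rename_i hpair hpipe heq; injection heq with h1 h2
    exact (hpipe h1.symm).elim

lemma bGo_cons {c : Char} (rest buf : List Char) (cells : List String) (flag : Bool)
    (h1 : ∀ (t₁ : List Char), c = '\\' → rest = '|' :: t₁ → False)
    (h2 : c = '|' → False) :
    bGo (c :: rest) buf cells flag = bGo rest (buf ++ [c]) cells false := by
  rw [bGo.eq_def]
  split
  · rename_i heq; exact absurd heq (by simp)
  · rename_i t₁ heq; injection heq with ha hb; exact (h1 t₁ ha hb).elim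
  · rename_i t₁ heq; injection heq with ha hb; exact (h2 ha).elim
  · rename_i hpair hpipe heq; injection heq with ha hb; rw [ha, hb]

lemma mapHd_congr {f g : List Char → List Char} (l : List (List Char))
    (h : ∀ x, f x = g x) : mapHd f l = mapHd g l := by
  cases l <;> simp [mapHd, h]

lemma bGo_spec : ∀ (s buf : List Char) (cells : List String) (flag : Bool),
    bGo s buf cells flag
      = cells ++ (if s.isEmpty && flag then []
          else (mapHd (fun x => buf ++ x) (T s)).map (fun c => String.ofList c)) := by
  intro s
  induction s using T.induct with
  | case1 =>
    intro buf cells flag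
    cases flag <;> simp [bGo, T, mapHd]
  | case2 t ih =>
    intro buf cells flag
    rw [bGo_pair, ih, T_pair, mapHd_mapHd]
    simp only [List.isEmpty_cons, Bool.false_and, Bool.and_false, Bool.false_eq_true, if_false]
    congr 2
    exact mapHd_congr _ (fun x => by simp)
  | case3 =>
    intro buf cells flag
    rw [bGo_pipe]
    rw [show bGo [] [] (cells ++ [String.ofList buf]) true = cells ++ [String.ofList buf] from by
      rw [bGo]; simp]
    rw [show T ['|'] = [[]] from by rw [T]]
    simp [mapHd]
  | case4 t h ih =>
    intro buf cells flag
    rw [bGo_pipe, ih, T_pipe_cons (fun hq => h hq)]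
    have hne : t.isEmpty = false := by
      cases t with
      | nil => exact (h rfl).elim
      | cons a r => rfl
    simp only [hne, Bool.false_and, Bool.false_eq_true, if_false, List.isEmpty_cons]
    rw [List.append_assoc]
    congr 1
    cases hp : T t with
    | nil => exact (T_ne_nil t hp).elim
    | cons a r => simp [mapHd]
  | case5 c t h1 h2 h3 ih =>
    intro buf cells flag
    rw [bGo_cons _ _ _ _ h1 h3, ih, T_cons h1 h3, mapHd_mapHd]
    simp only [List.isEmpty_cons, Bool.false_and, Bool.and_false, Bool.false_eq_true, if_false]
    congr 2
    exact mapHd_congr _ (fun x => by simp)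

lemma string_ext {s t : String} (h : s.toList = t.toList) : s = t := by
  have := congrArg String.ofList h
  simpa using this

lemma endswith_pipe (s : List Char) :
    PySem.Chars.endswith s ['|'] = true ↔ s.getLast? = some '|' := by
  rw [PySem.Chars.endswith, List.isSuffixOf_iff_suffix]
  constructor
  · rintro ⟨u, rfl⟩
    rw [List.getLast?_append_of_ne_nil _ (by simp)]
    rfl
  · intro h
    exact ⟨s.dropLast, List.dropLast_append_getLast? _ h⟩

lemma mapHd_id' (l : List (List Char)) : mapHd (fun x => x) l = l := by
  cases l <;> simp [mapHd]

lemma toList_drop_one {u : List Char} (hu : List.isPrefixOf ['|'] u = true) :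
    ∃ t, u = '|' :: t := by
  obtain ⟨w, hw⟩ := List.isPrefixOf_iff_prefix.mp hu
  exact ⟨w, hw.symm⟩

lemma ports_agree : ∀ (line : String), pvDomStr line = true →
    split_pipe_cells_py line = split_pipe_cells_py_alt line := by
  intro line hdom
  have hnl : noNul line.toList := noNul_of_dom hdom
  unfold split_pipe_cells_py split_pipe_cells_py_alt
  simp only []
  -- names
  set l := line.toList with hl
  have hph : ("\x00PIPE\x00" : String).toList = PHl := by decide
  have hbs : ("\\|" : String).toList = ['\\','|'] := by decide
  have hpipe : ("|" : String).toList = ['|'] := by decide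
  -- work1.toList = escA u
  have hw0 : (PySem.Str.replace line "\\|" "\x00PIPE\x00").toList = escA l := by
    rw [PySem.Str.toList_replace, hbs, hph, chars_replace_esc]
  have hw1 : (PySem.Str.strip (PySem.Str.replace line "\\|" "\x00PIPE\x00")).toList
      = escA (PySem.Chars.strip l) := by
    rw [PySem.Str.toList_strip, hw0, strip_escA]
  set u := PySem.Chars.strip l with hu
  have hnu : noNul u := noNul_strip hnl
  -- leading-pipe condition agrees
  have hsw : PySem.Str.startswith (PySem.Str.strip (PySem.Str.replace line "\\|" "\x00PIPE\x00")) "|"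
      = PySem.Str.startswith (PySem.Str.strip line) "|" := by
    rw [PySem.Str.startswith_eq, PySem.Str.startswith_eq, hpipe, hw1,
      PySem.Str.toList_strip, PySem.Chars.startswith, PySem.Chars.startswith,
      startswith_escA]
  -- shared tail: from the stripped, lead-trimmed char list v
  have elem : ∀ cl : List Char,
      PySem.Str.strip (PySem.Str.replace (String.ofList cl) "\x00PIPE\x00" "|")
        = String.ofList (PySem.Chars.strip (unescA cl)) := by
    intro cl
    apply string_ext
    rw [PySem.Str.toList_strip, PySem.Str.toList_replace]
    simp only [String.toList_ofList, hph, hpipe, chars_replace_unesc]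
  have elemB : ∀ cl : List Char,
      PySem.Str.strip (String.ofList cl) = String.ofList (PySem.Chars.strip cl) := by
    intro cl
    apply string_ext
    rw [PySem.Str.toList_strip]
    simp only [String.toList_ofList]
  have key : ∀ (v : List Char), noNul v →
      ((PySem.Chars.splitOn
          (if PySem.Chars.endswith (escA v) ['|'] then (escA v).dropLast else escA v)
          ['|']).map String.ofList).map
        (fun cell => PySem.Str.strip (PySem.Str.replace cell "\x00PIPE\x00" "|"))
      = (bGo v [] [] false).map (fun cell => PySem.Str.strip cell) := by
    intro v hnv
    have he : PySem.Chars.endswith (escA v) ['|'] = endsP v := by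
      cases hq : endsP v
      · cases hr : PySem.Chars.endswith (escA v) ['|']
        · rfl
        · exfalso
          have := (escA_last v).mp ((endswith_pipe _).mp hr)
          rw [hq] at this
          exact absurd this (by decide)
      · exact (endswith_pipe _).mpr ((escA_last v).mpr hq)
    rw [he, chars_splitOn_psplit, List.map_map]
    have hA : (psplit (if endsP v = true then (escA v).dropLast else escA v)).map
        ((fun cell => PySem.Str.strip (PySem.Str.replace cell "\x00PIPE\x00" "|")) ∘ String.ofList)
        = (T v).map (fun x => String.ofList (PySem.Chars.strip x)) := by
      have h1 : ((fun cell => PySem.Str.strip (PySem.Str.replace cell "\x00PIPE\x00" "|")) ∘ String.ofList)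
          = (fun x => String.ofList (PySem.Chars.strip x)) ∘ unescA := by
        funext cl
        exact elem cl
      rw [h1, ← List.map_map, main_trail v hnv]
    rw [hA, bGo_spec]
    simp only [Bool.and_false, Bool.false_eq_true, if_false, List.nil_append,
      mapHd_id', List.map_map]
    refine List.map_congr_left ?_
    intro cl _
    exact (elemB cl).symm
  -- branch on the leading pipe
  rw [hsw]
  by_cases hb : PySem.Str.startswith (PySem.Str.strip line) "|" = true
  · obtain ⟨t, ht⟩ : ∃ t, u = '|' :: t := by
      apply toList_drop_one
      have hb' := hb
      rw [PySem.Str.startswith_eq, PySem.Str.toList_strip, hpipe] at hb'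
      rw [PySem.Chars.startswith, ← hl, ← hu] at hb'
      exact hb'
    have hnt : noNul t := fun c hc => hnu c (by rw [ht]; simp [hc])
    rw [if_pos hb, if_pos hb]
    have hA2 : (PySem.Str.slice (PySem.Str.strip (PySem.Str.replace line "\\|" "\x00PIPE\x00")) (some 1) none).toList = escA t := by
      rw [PySem.Str.toList_slice]
      simp only [PySem.Chars.slice_eq_listSlice]
      rw [PySem.List.slice_from _ (by norm_num)]
      rw [hw1, ht, escA_cons' (by simp)]
      simp
    have hB2 : (PySem.Str.slice (PySem.Str.strip line) (some 1) none).toList = t := by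
      rw [PySem.Str.toList_slice]
      simp only [PySem.Chars.slice_eq_listSlice]
      rw [PySem.List.slice_from _ (by norm_num)]
      rw [PySem.Str.toList_strip, ← hl, ← hu, ht]
      simp
    rw [PySem.Str.endswith_eq, hpipe, hA2, apply_ite String.toList,
      show (PySem.Str.slice (PySem.Str.slice (PySem.Str.strip (PySem.Str.replace line "\\|" "\x00PIPE\x00")) (some 1) none) none (some (-1))).toList
          = (escA t).dropLast from by rw [PySem.Str.slice_to_neg_one, hA2],
      hA2, hB2]
    exact key t hnt
  · rw [if_neg hb, if_neg hb]
    rw [PySem.Str.endswith_eq, hpipe, hw1, apply_ite String.toList,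
      show (PySem.Str.slice (PySem.Str.strip (PySem.Str.replace line "\\|" "\x00PIPE\x00")) none (some (-1))).toList
          = (escA u).dropLast from by rw [PySem.Str.slice_to_neg_one, hw1],
      hw1, PySem.Str.toList_strip, ← hl, ← hu]
    exact key u hnu


-- ===== VERDICT (by name: the statement is the Claim_ definition above) =====
theorem split_pipe_cells_py_spec : Claim_equal_split_pipe_cells_py := by
  intro line hdom
  unfold Spec_split_pipe_cells_py
  exact ports_agree line hdom
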